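-- pv_equiv track=rewrite | github.com/ElToro13/Python | FilteringSpecialCharacters.py | SensorWords
-- ===== SOURCE A (Python) =====
-- def SensorWords(dato=""):
--     words = ['fuck', 'shit', 'bhenchod', 'madarchod','lode','chutiye','asshole','motherfucker', 'motherfucking', 'fucking', 'Fuck','fucks', 'shits', 'bhenchods', 'madarchods','lodes','chutiyes','assholes','motherfuckers', 'motherfucking', 'fucking', 'Fucks']
--     data=[]
--     listo = dato.split()
--     for i in range(0,len(listo)):
--         for j in range(0,len(words)):
--             if(words[j] == listo[i]):
--                 l = len(listo[i])-1
--                 g = list(listo[i])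
--                 for j in range(1,l):
--                         del g[j]
--                         g.insert(j,'*')
--                 j = ''.join(g)
--                 del listo[i]
--                 listo.insert(i,j)
--     d = ' '.join(listo)
--
--
--     return d
-- ===== SOURCE B (Python) =====
-- _BAD = frozenset(['fuck', 'shit', 'bhenchod', 'madarchod', 'lode', 'chutiye',
--                   'asshole', 'motherfucker', 'motherfucking', 'fucking', 'Fuck',
--                   'fucks', 'shits', 'bhenchods', 'madarchods', 'lodes',
--                   'chutiyes', 'assholes', 'motherfuckers', 'Fucks'])
--
-- def SensorWords(dato=""):
--     return ' '.join(t[0] + '*' * (len(t) - 2) + t[-1] if t in _BAD else t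
--                     for t in dato.split())
-- ===== Notes on version B (the rewrite author's own statement) =====
-- stated objective: simpler
-- what changed: B replaces A's index-mutating nested scans (per token a linear scan over the 22-word list plus an inner per-index del/insert loop rebuilding the mask, then del/insert back into the token list) with one comprehension over tokens using set membership and a closed-form mask built from the first character, a run of asterisks, and the last character.
import Mathlib
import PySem

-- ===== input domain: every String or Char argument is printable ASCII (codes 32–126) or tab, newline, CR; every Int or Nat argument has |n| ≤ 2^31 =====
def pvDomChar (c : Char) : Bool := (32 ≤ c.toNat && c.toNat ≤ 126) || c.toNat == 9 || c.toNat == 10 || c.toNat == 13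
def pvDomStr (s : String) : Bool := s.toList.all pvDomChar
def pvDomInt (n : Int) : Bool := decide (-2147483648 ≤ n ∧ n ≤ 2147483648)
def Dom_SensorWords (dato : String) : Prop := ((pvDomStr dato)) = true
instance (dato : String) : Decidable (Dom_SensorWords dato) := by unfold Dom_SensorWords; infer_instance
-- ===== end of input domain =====

-- B censors the same bad words but with a set membership test and a closed-form mask
-- (first char, asterisk run, last char) instead of A's nested per-index del/insert loops: simpler.

-- ===== PORT A =====
def pvWordsA : List String :=
  ["fuck", "shit", "bhenchod", "madarchod", "lode", "chutiye", "asshole",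
   "motherfucker", "motherfucking", "fucking", "Fuck", "fucks", "shits",
   "bhenchods", "madarchods", "lodes", "chutiyes", "assholes",
   "motherfuckers", "motherfucking", "fucking", "Fucks"]

-- A's inner char loop: l = len(w)-1; g = list(w); for j in range(1, l): del g[j]; g.insert(j, '*'); ''.join(g)
def pvMaskA (s : String) : String :=
  let l : Int := PySem.Str.len s - 1
  let g : List Char := s.toList
  let g := (PySem.List.pyRange 1 l 1).foldl (fun g j =>
      match PySem.List.pop? g j with
      | some r => PySem.List.insert r.2 j '*'
      | none => g) g
  String.ofList g

-- A's inner word loop body: if words[j] == listo[i]: mask, del listo[i], insert back at i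
def pvInnerStep (i : Int) (listo : List String) (wj : String) : List String :=
  match PySem.List.pyGet? listo i with
  | some s =>
      if wj == s then
        match PySem.List.pop? listo i with
        | some r => PySem.List.insert r.2 i (pvMaskA s)
        | none => listo
      else listo
  | none => listo

def pvInnerA (i : Int) (listo : List String) : List String :=
  pvWordsA.foldl (pvInnerStep i) listo

def SensorWords (dato : String) : String :=
  let listo := PySem.Str.split₀ dato
  let listo :=
    (PySem.List.pyRange 0 (listo.length : Int) 1).foldl (fun l i => pvInnerA i l) listo
  PySem.Str.join " " listo

-- ===== PORT B =====
def pvBadB : PySem.Set String :=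
  PySem.Set.ofList
    ["fuck", "shit", "bhenchod", "madarchod", "lode", "chutiye", "asshole",
     "motherfucker", "motherfucking", "fucking", "Fuck", "fucks", "shits",
     "bhenchods", "madarchods", "lodes", "chutiyes", "assholes",
     "motherfuckers", "Fucks"]

-- t[0] + '*' * (len(t) - 2) + t[-1]  (applied only to tokens in pvBadB, all nonempty,
-- so the fallback branch is unreachable)
def pvMaskB (t : String) : String :=
  match PySem.Str.pyGet? t 0, PySem.Str.pyGet? t (-1) with
  | some c0, some c1 =>
      String.ofList (c0 :: (List.replicate (PySem.Str.len t - 2).toNat '*' ++ [c1]))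
  | _, _ => t

def SensorWords_alt (dato : String) : String :=
  PySem.Str.join " "
    ((PySem.Str.split₀ dato).map
      (fun t => if PySem.Set.contains pvBadB t then pvMaskB t else t))

-- ===== PRECONDITION & SPEC =====
def Spec_SensorWords (dato : String) (out : String) : Prop := out = SensorWords_alt dato
instance (dato : String) (out : String) : Decidable (Spec_SensorWords dato out) := by
  unfold Spec_SensorWords; infer_instance

-- ===== CLAIM (what is proved, stated in full; the proofs are below) =====
def Claim_equal_SensorWords : Prop :=
  ∀ (dato : String), Dom_SensorWords dato → Spec_SensorWords dato (SensorWords dato)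

-- ===== LEMMAS AND PROOFS =====

-- the per-token transformation both programs compute
def pvF (s : String) : String := if s ∈ pvWordsA then pvMaskA s else s

lemma pvInsert_clamped (xs : List String) (k : Nat) (v : String) (h : k ≤ xs.length) :
    PySem.List.insert xs (k : Int) v = xs.take k ++ v :: xs.drop k := by
  simp only [PySem.List.insert, PySem.List.sliceIndices]
  norm_num
  rw [min_eq_left (by exact_mod_cast h), if_neg (not_lt.mpr (Int.natCast_nonneg k))]
  simp

lemma pvInsert_erase (lst : List String) (k : Nat) (v : String) (h : k < lst.length) :
    PySem.List.insert (lst.eraseIdx k) (k : Int) v = lst.set k v := by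
  rw [pvInsert_clamped _ _ _ (by simp [List.length_eraseIdx, h]; omega),
      List.eraseIdx_eq_take_drop_succ, List.set_eq_take_cons_drop v h]
  have htk : (lst.take k).length = k := List.length_take_of_le (Nat.le_of_lt h)
  rw [List.take_left' htk, List.drop_left' htk]

lemma pvInnerStep_eq (lst : List String) (k : Nat) (h : k < lst.length) (wj : String) :
    pvInnerStep (k : Int) lst wj = if wj = lst[k] then lst.set k (pvMaskA lst[k]) else lst := by
  unfold pvInnerStep
  rw [PySem.List.pyGet?_natCast, List.getElem?_eq_getElem h, PySem.List.pop?_natCast lst k h]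
  simp only [beq_iff_eq]
  split_ifs with hw
  · exact pvInsert_erase lst k _ h
  · rfl

lemma pvMaskNotBad : ∀ s ∈ pvWordsA, pvMaskA s ∉ pvWordsA := by decide

lemma pvFoldlInner (ws : List String) (hsub : ∀ w ∈ ws, w ∈ pvWordsA)
    (lst : List String) (k : Nat) (h : k < lst.length) :
    ws.foldl (pvInnerStep (k : Int)) lst =
      if lst[k] ∈ ws then lst.set k (pvMaskA lst[k]) else lst := by
  induction ws generalizing lst with
  | nil => simp
  | cons w ws ih =>
      rw [List.foldl_cons, pvInnerStep_eq lst k h w]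
      by_cases hw : w = lst[k]
      · rw [if_pos hw]
        have h' : k < (lst.set k (pvMaskA lst[k])).length := by simpa using h
        rw [ih (fun x hx => hsub x (List.mem_cons_of_mem _ hx)) _ h']
        have hmem : lst[k] ∈ pvWordsA := hw ▸ hsub w (List.mem_cons_self ..)
        have hget : (lst.set k (pvMaskA lst[k]))[k]'h' = pvMaskA lst[k] := by simp
        rw [if_neg (by
              rw [hget]
              exact fun hin => pvMaskNotBad _ hmem (hsub _ (List.mem_cons_of_mem _ hin)))]
        rw [if_pos (List.mem_cons.mpr (Or.inl hw.symm))]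
      · rw [if_neg hw, ih (fun x hx => hsub x (List.mem_cons_of_mem _ hx)) lst h]
        by_cases hm : lst[k] ∈ ws
        · rw [if_pos hm, if_pos (List.mem_cons.mpr (Or.inr hm))]
        · rw [if_neg hm, if_neg (by
              intro hc
              rcases List.mem_cons.mp hc with h1 | h2
              · exact hw h1.symm
              · exact hm h2)]

lemma pvMaskAB : ∀ s ∈ pvWordsA, pvMaskA s = pvMaskB s := by decide

lemma pvMemIff (t : String) : (t ∈ pvWordsA) ↔ PySem.Set.contains pvBadB t = true := by
  rw [PySem.Set.contains, List.contains_iff_mem, pvBadB, PySem.Set.mem_ofList]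
  constructor <;> (intro hmem; simp only [pvWordsA, List.mem_cons, List.not_mem_nil, or_false] at *; tauto)

lemma pvInnerA_eq (lst : List String) (k : Nat) (h : k < lst.length) :
    pvInnerA (k : Int) lst = lst.set k (pvF lst[k]) := by
  rw [pvInnerA, pvFoldlInner pvWordsA (fun _ hx => hx) lst k h, pvF]
  split_ifs with hm
  · rfl
  · exact (List.set_getElem_self h).symm

lemma pvOuter (n : Nat) (m : Nat) : ∀ (k : Nat) (lst : List String),
    lst.length = n → n ≤ k + m →
    (PySem.List.pyRange (k : Int) (n : Int) 1).foldl (fun l i => pvInnerA i l) lst =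
      lst.take k ++ (lst.drop k).map pvF := by
  induction m with
  | zero =>
      intro k lst hlen hk
      rw [PySem.List.pyRange_one_eq_nil (by exact_mod_cast (show n ≤ k by omega)), List.foldl_nil,
          List.take_of_length_le (show lst.length ≤ k by omega),
          List.drop_of_length_le (show lst.length ≤ k by omega)]
      simp
  | succ m ih =>
      intro k lst hlen hk
      by_cases hkn : k < n
      · rw [PySem.List.pyRange_one_cons (by exact_mod_cast hkn), List.foldl_cons]
        have hkl : k < lst.length := by omega
        rw [pvInnerA_eq lst k hkl]
        have hcast : ((k : Int) + 1) = ((k + 1 : Nat) : Int) := by push_cast; ring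
        rw [hcast, ih (k + 1) _ (by simpa using hlen) (by omega)]
        rw [List.set_eq_take_cons_drop _ hkl]
        have htk : (lst.take k).length = k := List.length_take_of_le (Nat.le_of_lt hkl)
        have hrw : lst.take k ++ pvF lst[k] :: lst.drop (k + 1)
            = (lst.take k ++ [pvF lst[k]]) ++ lst.drop (k + 1) := by simp
        rw [hrw, List.take_left' (by simp [htk]), List.drop_left' (by simp [htk]),
            List.drop_eq_getElem_cons hkl, List.map_cons]
        simp [List.append_assoc]
      · rw [PySem.List.pyRange_one_eq_nil (by exact_mod_cast (show n ≤ k by omega)), List.foldl_nil,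
            List.take_of_length_le (show lst.length ≤ k by omega),
            List.drop_of_length_le (show lst.length ≤ k by omega)]
        simp

lemma pvF_eq (t : String) :
    pvF t = if PySem.Set.contains pvBadB t then pvMaskB t else t := by
  rw [pvF]
  by_cases hm : t ∈ pvWordsA
  · rw [if_pos hm, if_pos ((pvMemIff t).mp hm), pvMaskAB t hm]
  · rw [if_neg hm, if_neg (fun hc => hm ((pvMemIff t).mpr hc))]

-- ===== VERDICT (by name: the statement is the Claim_ definition above) =====
theorem SensorWords_spec : Claim_equal_SensorWords := by
  intro dato _
  unfold Spec_SensorWords SensorWords SensorWords_alt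
  dsimp only
  rw [show ((0 : Int) = ((0 : Nat) : Int)) from rfl,
      pvOuter (PySem.Str.split₀ dato).length (PySem.Str.split₀ dato).length 0 _ rfl (by omega)]
  simp only [List.take_zero, List.drop_zero, List.nil_append]
  congr 1
  exact List.map_congr_left (fun t _ => pvF_eq t)
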